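-- pv_equiv track=rewrite | github.com/jeroen11dijk/WMstar | mainPython.py | convert_graph
-- ===== SOURCE A (Python) =====
-- def convert_graph(graph):
--     grap_new = {}
--     height = len(graph)
--     width = len(graph[0])
--     for i in range(len(graph)):
--         for j in range(len(graph[0])):
--             if graph[i][j] == 0:
--                 current = (j, i)
--                 neighbours = []
--                 if i != 0 and graph[i - 1][j] == 0:
--                     neighbours.append((j, i - 1))
--                 if j != 0 and graph[i][j - 1] == 0:
--                     neighbours.append((j - 1, i))
--                 if i != height - 1 and graph[i + 1][j] == 0:
--                     neighbours.append((j, i + 1))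
--                 if j != width - 1 and graph[i][j + 1] == 0:
--                     neighbours.append((j + 1, i))
--                 grap_new[current] = neighbours
--     return grap_new
-- ===== SOURCE B (Python) =====
-- def convert_graph(graph):
--     height = len(graph)
--     width = len(graph[0])
--     # Column-major half-edge sweep: each adjacency is discovered exactly once,
--     # from its later endpoint, and recorded symmetrically on both endpoints.
--     adj = {}
--     for j in range(width):
--         for i in range(height):
--             if graph[i][j] == 0:
--                 cur = (j, i)
--                 adj[cur] = []
--                 for prev in ((j, i - 1), (j - 1, i)):
--                     if prev in adj:
--                         adj[cur].append(prev)
--                         adj[prev].append(cur)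
--     # re-emit in the row-major key order of the result
--     return {(j, i): adj[(j, i)] for i in range(height) for j in range(width) if graph[i][j] == 0}
-- ===== Notes on version B (the rewrite author's own statement) =====
-- stated objective: alternative
-- what changed: B replaces A's per-cell four-directional bounds-and-value checks by a column-major half-edge sweep that discovers each adjacency exactly once (from its later endpoint) and records it symmetrically on both endpoints' growing lists, then re-emits the dict in row-major key order.
import Mathlib
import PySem

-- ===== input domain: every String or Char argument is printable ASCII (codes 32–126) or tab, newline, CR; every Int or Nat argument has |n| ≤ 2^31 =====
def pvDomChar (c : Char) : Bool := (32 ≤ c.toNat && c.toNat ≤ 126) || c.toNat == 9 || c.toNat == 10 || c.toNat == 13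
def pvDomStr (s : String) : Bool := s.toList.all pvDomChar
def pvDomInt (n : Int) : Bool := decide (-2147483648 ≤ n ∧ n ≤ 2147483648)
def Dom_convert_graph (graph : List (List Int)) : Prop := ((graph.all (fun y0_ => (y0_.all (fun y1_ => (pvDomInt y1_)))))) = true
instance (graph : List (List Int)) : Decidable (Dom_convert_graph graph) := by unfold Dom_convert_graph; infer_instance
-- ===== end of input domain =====

-- B builds the adjacency by a column-major half-edge sweep (each adjacency found once,
-- recorded symmetrically on both endpoints), then re-emits the dict in row-major key
-- order; objective: alternative (same cost, different algorithm).

-- ===== PORT A =====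
def convert_graph (graph : List (List Int)) : List (Int × Int × List (Int × Int)) :=
  let height : Int := (graph.length : Int)
  let width : Int := ((PySem.List.pyGetD graph 0 []).length : Int)
  let d : PySem.Dict (Int × Int) (List (Int × Int)) :=
    (PySem.List.pyRange 0 (graph.length : Int) 1).foldl (fun d i =>
      (PySem.List.pyRange 0 width 1).foldl (fun d j =>
        if PySem.List.pyGetD (PySem.List.pyGetD graph i []) j 1 = 0 then
          let current : Int × Int := (j, i)
          let neighbours : List (Int × Int) := []
          let neighbours := if i ≠ 0 ∧ PySem.List.pyGetD (PySem.List.pyGetD graph (i-1) []) j 1 = 0 then neighbours ++ [(j, i-1)] else neighbours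
          let neighbours := if j ≠ 0 ∧ PySem.List.pyGetD (PySem.List.pyGetD graph i []) (j-1) 1 = 0 then neighbours ++ [(j-1, i)] else neighbours
          let neighbours := if i ≠ height - 1 ∧ PySem.List.pyGetD (PySem.List.pyGetD graph (i+1) []) j 1 = 0 then neighbours ++ [(j, i+1)] else neighbours
          let neighbours := if j ≠ width - 1 ∧ PySem.List.pyGetD (PySem.List.pyGetD graph i []) (j+1) 1 = 0 then neighbours ++ [(j+1, i)] else neighbours
          d.insert current neighbours
        else d) d) PySem.Dict.empty
  -- re-association of each dict item ((j,i), ns) to (j, i, ns), the required return type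
  d.items.map (fun p => (p.1.1, p.1.2, p.2))

-- ===== PORT B =====
def convert_graph_alt (graph : List (List Int)) : List (Int × Int × List (Int × Int)) :=
  let height : Int := (graph.length : Int)
  let width : Int := ((PySem.List.pyGetD graph 0 []).length : Int)
  -- column-major half-edge sweep: 'for j in range(width): for i in range(height): …'
  let adj : PySem.Dict (Int × Int) (List (Int × Int)) :=
    (PySem.List.pyRange 0 width 1).foldl (fun adj j =>
      (PySem.List.pyRange 0 height 1).foldl (fun adj i =>
        if PySem.List.pyGetD (PySem.List.pyGetD graph i []) j 1 = 0 then
          let cur : Int × Int := (j, i)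
          let adj := adj.insert cur []
          -- 'for prev in ((j, i-1), (j-1, i)): if prev in adj: append both ways'
          [(j, i - 1), (j - 1, i)].foldl (fun adj prev =>
            if adj.contains prev then
              let adj := adj.modify cur [] (fun l => l ++ [prev])
              adj.modify prev [] (fun l => l ++ [cur])
            else adj) adj
        else adj) adj) PySem.Dict.empty
  -- final row-major dict comprehension; 'adj[(j, i)]' is ported as getD with default []
  -- (exact here: every open cell was inserted into adj, so the key is always present)
  let d : PySem.Dict (Int × Int) (List (Int × Int)) :=
    (PySem.List.pyRange 0 height 1).foldl (fun d i =>
      (PySem.List.pyRange 0 width 1).foldl (fun d j =>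
        if PySem.List.pyGetD (PySem.List.pyGetD graph i []) j 1 = 0 then
          d.insert (j, i) (adj.getD (j, i) [])
        else d) d) PySem.Dict.empty
  d.items.map (fun p => (p.1.1, p.1.2, p.2))

-- ===== PRECONDITION & SPEC =====
-- Pre_ excludes exactly the inputs where the Python A raises IndexError: the empty grid
-- (graph[0]) and grids with a row shorter than the first row (graph[i][j] out of range).
def Pre_convert_graph (graph : List (List Int)) : Prop :=
  graph ≠ [] ∧ ∀ row ∈ graph, (PySem.List.pyGetD graph 0 []).length ≤ row.length
instance (graph : List (List Int)) : Decidable (Pre_convert_graph graph) := by unfold Pre_convert_graph; infer_instance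
def pvWitness_convert_graph : List (List Int) := [[0, 1], [0, 0]]
def Spec_convert_graph (graph : List (List Int)) (out : List (Int × Int × List (Int × Int))) : Prop := out = convert_graph_alt graph
instance (graph : List (List Int)) (out : List (Int × Int × List (Int × Int))) : Decidable (Spec_convert_graph graph out) := by unfold Spec_convert_graph; infer_instance

-- ===== CLAIM (what is proved, stated in full; the proofs are below) =====
def Claim_equal_convert_graph : Prop := ∀ (graph : List (List Int)), Dom_convert_graph graph → Pre_convert_graph graph → Spec_convert_graph graph (convert_graph graph)

-- ===== LEMMAS AND PROOFS =====

-- the value A and B read at cell (i, j): out-of-range reads give the non-open default 1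
def pvVal (graph : List (List Int)) (i j : Int) : Int :=
  PySem.List.pyGetD (PySem.List.pyGetD graph i []) j 1

def pvW (graph : List (List Int)) : Int := ((PySem.List.pyGetD graph 0 []).length : Int)

-- the open cells as (i, j), in the row-major order of the output dict
def pvCells (graph : List (List Int)) : List (Int × Int) :=
  (PySem.List.pyRange 0 (graph.length : Int) 1).flatMap (fun i =>
    ((PySem.List.pyRange 0 (pvW graph) 1).filter (fun j => pvVal graph i j == 0)).map (fun j => (i, j)))

-- the open cells as (j, i) keys, in B's column-major sweep order
def pvCm (graph : List (List Int)) : List (Int × Int) :=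
  (PySem.List.pyRange 0 (pvW graph) 1).flatMap (fun j =>
    ((PySem.List.pyRange 0 (graph.length : Int) 1).filter (fun i => pvVal graph i j == 0)).map (fun i => (j, i)))

-- A's neighbour list for an open cell (i, j)
def pvNbrA (graph : List (List Int)) (i j : Int) : List (Int × Int) :=
  (if i ≠ 0 ∧ pvVal graph (i-1) j = 0 then [(j, i-1)] else []) ++
  (if j ≠ 0 ∧ pvVal graph i (j-1) = 0 then [(j-1, i)] else []) ++
  (if i ≠ (graph.length : Int) - 1 ∧ pvVal graph (i+1) j = 0 then [(j, i+1)] else []) ++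
  (if j ≠ pvW graph - 1 ∧ pvVal graph i (j+1) = 0 then [(j+1, i)] else [])

-- the four neighbour keys of a key c = (j, i), in A's per-cell order up, left, down, right
def pvCands (c : Int × Int) : List (Int × Int) :=
  [(c.1, c.2 - 1), (c.1 - 1, c.2), (c.1, c.2 + 1), (c.1 + 1, c.2)]

-- neighbours of c restricted to a processed set P, in candidate order
def pvNbrIn (P : List (Int × Int)) (c : Int × Int) : List (Int × Int) :=
  (pvCands c).filter (fun p => decide (p ∈ P))

-- B's per-open-cell step of the sweep
def pvStep (d : PySem.Dict (Int × Int) (List (Int × Int))) (c : Int × Int) :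
    PySem.Dict (Int × Int) (List (Int × Int)) :=
  [(c.1, c.2 - 1), (c.1 - 1, c.2)].foldl (fun d prev =>
    if d.contains prev then
      (d.modify c [] (fun l => l ++ [prev])).modify prev [] (fun l => l ++ [c])
    else d) (d.insert c [])

-- column-major order on keys (j, i): earlier column, or same column and earlier row
def pvLt (a b : Int × Int) : Prop := a.1 < b.1 ∨ (a.1 = b.1 ∧ a.2 < b.2)

theorem pv_foldl_if_filter {α β : Type} (P : β → Prop) [DecidablePred P] (step : α → β → α) :
    ∀ (ys : List β) (d : α),
      ys.foldl (fun d j => if P j then step d j else d) d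
        = (ys.filter (fun j => decide (P j))).foldl step d := by
  intro ys
  induction ys with
  | nil => intro d; rfl
  | cons y ys ih =>
    intro d
    by_cases h : P y <;> simp [h, ih]

theorem pv_foldl_foldl_flatMap {α β γ : Type} (g : β → List γ) (step : α → γ → α) :
    ∀ (xs : List β) (d : α),
      xs.foldl (fun d i => (g i).foldl step d) d = (xs.flatMap g).foldl step d := by
  intro xs
  induction xs with
  | nil => intro d; rfl
  | cons x xs ih => intro d; simp [List.flatMap_cons, List.foldl_append, ih]

theorem pv_nodup_flatMap_tag (f : Int → List Int) :
    ∀ (is : List Int), is.Nodup → (∀ i, (f i).Nodup) →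
      (is.flatMap (fun i => (f i).map (fun j => ((j, i) : Int × Int)))).Nodup := by
  intro is
  induction is with
  | nil => intro _ _; simp
  | cons x xs ih =>
    intro hno hf
    rw [List.flatMap_cons]
    apply List.Nodup.append
    · exact (hf x).map (fun a b h => by simpa using congrArg Prod.fst h)
    · exact ih hno.of_cons hf
    · intro p hp hq
      obtain ⟨j, _, rfl⟩ := List.mem_map.mp hp
      obtain ⟨i, hi, hji⟩ := List.mem_flatMap.mp hq
      obtain ⟨j', _, hj'⟩ := List.mem_map.mp hji
      have hx : i = x := by simpa using congrArg Prod.snd hj'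
      rw [hx] at hi
      exact (List.nodup_cons.mp hno).1 hi

theorem pv_mem_cells {graph : List (List Int)} {i j : Int} :
    (i, j) ∈ pvCells graph ↔
      0 ≤ i ∧ i < (graph.length : Int) ∧ 0 ≤ j ∧ j < pvW graph ∧ pvVal graph i j = 0 := by
  simp only [pvCells, List.mem_flatMap, List.mem_map, List.mem_filter,
    PySem.List.mem_pyRange_one, beq_iff_eq, Prod.mk.injEq]
  constructor
  · rintro ⟨a, ⟨ha0, ha1⟩, b, ⟨⟨hb0, hb1⟩, hv⟩, rfl, rfl⟩
    exact ⟨ha0, ha1, hb0, hb1, hv⟩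
  · rintro ⟨h1, h2, h3, h4, h5⟩
    exact ⟨i, ⟨h1, h2⟩, j, ⟨⟨h3, h4⟩, h5⟩, rfl, rfl⟩

theorem pv_mem_cm {graph : List (List Int)} {j i : Int} :
    (j, i) ∈ pvCm graph ↔
      0 ≤ j ∧ j < pvW graph ∧ 0 ≤ i ∧ i < (graph.length : Int) ∧ pvVal graph i j = 0 := by
  simp only [pvCm, List.mem_flatMap, List.mem_map, List.mem_filter,
    PySem.List.mem_pyRange_one, beq_iff_eq, Prod.mk.injEq]
  constructor
  · rintro ⟨a, ⟨ha0, ha1⟩, b, ⟨⟨hb0, hb1⟩, hv⟩, rfl, rfl⟩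
    exact ⟨ha0, ha1, hb0, hb1, hv⟩
  · rintro ⟨h1, h2, h3, h4, h5⟩
    exact ⟨j, ⟨h1, h2⟩, i, ⟨⟨h3, h4⟩, h5⟩, rfl, rfl⟩

theorem pv_cm_pairwise (graph : List (List Int)) : (pvCm graph).Pairwise pvLt := by
  unfold pvCm
  rw [List.pairwise_flatMap]
  constructor
  · intro j _
    rw [List.pairwise_map]
    exact ((PySem.List.pairwise_lt_pyRange_one 0 (graph.length : Int)).filter _).imp
      (fun h => Or.inr ⟨rfl, h⟩)
  · exact (PySem.List.pairwise_lt_pyRange_one 0 (pvW graph)).imp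
      (fun {j1 j2} hlt x hx y hy => by
        obtain ⟨a, _, rfl⟩ := List.mem_map.mp hx
        obtain ⟨b, _, rfl⟩ := List.mem_map.mp hy
        exact Or.inl hlt)

-- membership in the candidate list is symmetric (grid adjacency)
theorem pv_cands_symm (c y : Int × Int) : c ∈ pvCands y ↔ y ∈ pvCands c := by
  rcases c with ⟨a, b⟩; rcases y with ⟨u, v⟩
  simp only [pvCands, List.mem_cons, List.not_mem_nil, or_false, Prod.mk.injEq]
  omega

-- the step establishes the invariant for done ++ [c]
theorem pv_step_spec (c : Int × Int) (done : List (Int × Int))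
    (hdone : ∀ a ∈ done, pvLt a c)
    (d : PySem.Dict (Int × Int) (List (Int × Int)))
    (hc : ∀ y, d.contains y = decide (y ∈ done))
    (hg : ∀ y, d.getD y [] = if y ∈ done then pvNbrIn done y else []) :
    (∀ y, (pvStep d c).contains y = decide (y ∈ done ++ [c])) ∧
    (∀ y, (pvStep d c).getD y [] = if y ∈ done ++ [c] then pvNbrIn (done ++ [c]) y else []) := by
  rcases c with ⟨a, b⟩
  -- cells at or after (a, b) in column-major order are not yet processed
  have hnot : ∀ y : Int × Int, ¬ pvLt y (a, b) → y ∉ done := by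
    intro y hy hmem
    exact hy (hdone y hmem)
  have hcd : ((a, b) : Int × Int) ∉ done := hnot _ (by simp [pvLt])
  have hdown : ((a, b + 1) : Int × Int) ∉ done := hnot _ (by simp [pvLt])
  have hright : ((a + 1, b) : Int × Int) ∉ done := hnot _ (by simp [pvLt])
  have hupright : ((a + 1, b - 1) : Int × Int) ∉ done := hnot _ (by simp [pvLt])
  -- pair disequalities used throughout
  have n1 : ((a, b - 1) : Int × Int) ≠ (a, b) := by simp
  have n2 : ((a - 1, b) : Int × Int) ≠ (a, b) := by simp
  have n3 : ((a - 1, b) : Int × Int) ≠ (a, b - 1) := by simp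
  simp only [pvStep, List.foldl_cons, List.foldl_nil]
  have hcont0 : (d.insert ((a : Int), b) []).contains (a, b - 1) = decide ((a, b - 1) ∈ done) := by
    simp [PySem.Dict.contains_insert, hc, n1]
  have n4 : ((a, b + 1) : Int × Int) ≠ (a, b) := by simp
  have n5 : ((a + 1, b) : Int × Int) ≠ (a, b) := by simp
  have n6 : ((a, b - 2) : Int × Int) ≠ (a, b) := by simp
  have n7 : ((a - 1, b - 1) : Int × Int) ≠ (a, b) := by simp
  have n8 : ((a + 1, b - 1) : Int × Int) ≠ (a, b) := by simp
  have n9 : ((a - 2, b) : Int × Int) ≠ (a, b) := by simp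
  have n10 : ((a - 1, b + 1) : Int × Int) ≠ (a, b) := by simp
  -- a cell of done other than up/left is not adjacent to c
  have hgen : ∀ y : Int × Int, y ∈ done → y ≠ (a, b - 1) → y ≠ (a - 1, b) →
      pvNbrIn (done ++ [(a, b)]) y = pvNbrIn done y := by
    intro y hyd y2 y3
    have hcny : ((a, b) : Int × Int) ∉ pvCands y := by
      intro hmem
      have hy := (pv_cands_symm (a, b) y).mp hmem
      simp only [pvCands, List.mem_cons, List.not_mem_nil, or_false] at hy
      rcases hy with h | h | h | h
      · exact y2 h
      · exact y3 h
      · exact hdown (h ▸ hyd)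
      · exact hright (h ▸ hyd)
    unfold pvNbrIn
    apply List.filter_congr
    intro p hp
    have hpc : p ≠ (a, b) := fun h => hcny (h ▸ hp)
    simp [List.mem_append, hpc]
  -- appending c to the processed set appends c to its upper neighbour's list …
  have hupEq : pvNbrIn (done ++ [(a, b)]) (a, b - 1) = pvNbrIn done (a, b - 1) ++ [(a, b)] := by
    have e0 : b - 1 + 1 = b := by omega
    simp only [pvNbrIn, pvCands, List.filter_cons, List.filter_nil, List.mem_append,
      List.mem_singleton, e0]
    by_cases m1 : ((a, b - 1 - 1) : Int × Int) ∈ done <;>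
    by_cases m2 : ((a - 1, b - 1) : Int × Int) ∈ done <;>
      (simp [m1, m2, hcd, hupright] <;> omega)
  -- … and to its left neighbour's list
  have hlfEq : pvNbrIn (done ++ [(a, b)]) (a - 1, b) = pvNbrIn done (a - 1, b) ++ [(a, b)] := by
    have e0 : a - 1 + 1 = a := by omega
    simp only [pvNbrIn, pvCands, List.filter_cons, List.filter_nil, List.mem_append,
      List.mem_singleton, e0]
    by_cases m1 : ((a - 1, b - 1) : Int × Int) ∈ done <;>
    by_cases m2 : ((a - 1 - 1, b) : Int × Int) ∈ done <;>
    by_cases m3 : ((a - 1, b + 1) : Int × Int) ∈ done <;>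
      (simp [m1, m2, m3, hcd] <;> omega)
  by_cases hu : ((a, b - 1) : Int × Int) ∈ done <;>
  by_cases hl : ((a - 1, b) : Int × Int) ∈ done
  · -- both the upper and the left neighbour are already processed
    rw [if_pos (by rw [hcont0]; simp [hu] :
      (d.insert ((a : Int), b) ([] : List (Int × Int))).contains (a, b - 1) = true)]
    rw [if_pos (by simp [PySem.Dict.contains_modify, PySem.Dict.contains_insert, hc, hl] :
      (((d.insert ((a : Int), b) ([] : List (Int × Int))).modify (a, b) []
        (fun l => l ++ [(a, b - 1)])).modify (a, b - 1) []
        (fun l => l ++ [(a, b)])).contains (a - 1, b) = true)]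
    refine ⟨fun y => ?_, fun y => ?_⟩
    · by_cases y1 : y = ((a : Int), b) <;> by_cases y2 : y = ((a : Int), b - 1) <;>
      by_cases y3 : y = ((a : Int) - 1, b) <;> by_cases hyd : y ∈ done <;>
      simp [PySem.Dict.contains_modify, PySem.Dict.contains_insert, hc, y1, y2, y3, hyd, hu, hl]
    · by_cases y1 : y = ((a : Int), b)
      · subst y1
        simp [PySem.Dict.getD_modify, PySem.Dict.getD_insert_self, n1, n2, n3,
          pvNbrIn, pvCands, hu, hl, hcd, hdown, hright, n4, n5]
        rw [if_neg (by omega : ¬ a = a - 1), if_neg (by omega : ¬ b = b - 1)]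
        rfl
      by_cases y2 : y = ((a : Int), b - 1)
      · subst y2
        rw [PySem.Dict.getD_modify, if_neg n3.symm, PySem.Dict.getD_modify, if_neg n1,
          PySem.Dict.getD_modify, if_pos rfl, PySem.Dict.getD_modify, if_neg n1,
          PySem.Dict.getD_insert_of_ne _ _ _ n1, hg, if_pos hu,
          if_pos (by simp [hu] : ((a, b - 1) : Int × Int) ∈ done ++ [(a, b)]), hupEq]
      by_cases y3 : y = ((a : Int) - 1, b)
      · subst y3
        rw [PySem.Dict.getD_modify, if_pos rfl, PySem.Dict.getD_modify, if_neg n2,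
          PySem.Dict.getD_modify, if_neg n3, PySem.Dict.getD_modify, if_neg n2,
          PySem.Dict.getD_insert_of_ne _ _ _ n2, hg, if_pos hl,
          if_pos (by simp [hl] : ((a - 1, b) : Int × Int) ∈ done ++ [(a, b)]), hlfEq]
      · rw [PySem.Dict.getD_modify, if_neg y3, PySem.Dict.getD_modify, if_neg y1,
          PySem.Dict.getD_modify, if_neg y2, PySem.Dict.getD_modify, if_neg y1,
          PySem.Dict.getD_insert_of_ne _ _ _ y1, hg]
        by_cases hyd : y ∈ done
        · rw [if_pos hyd, if_pos (by simp [hyd]), hgen y hyd y2 y3]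
        · rw [if_neg hyd, if_neg (by simp [hyd, y1])]
  · -- only the upper neighbour is processed
    rw [if_pos (by rw [hcont0]; simp [hu] :
      (d.insert ((a : Int), b) ([] : List (Int × Int))).contains (a, b - 1) = true)]
    rw [if_neg (by simp [PySem.Dict.contains_modify, PySem.Dict.contains_insert, hc, hl] :
      ¬ ((((d.insert ((a : Int), b) ([] : List (Int × Int))).modify (a, b) []
        (fun l => l ++ [(a, b - 1)])).modify (a, b - 1) []
        (fun l => l ++ [(a, b)])).contains (a - 1, b) = true))]
    refine ⟨fun y => ?_, fun y => ?_⟩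
    · by_cases y1 : y = ((a : Int), b) <;> by_cases y2 : y = ((a : Int), b - 1) <;>
      by_cases y3 : y = ((a : Int) - 1, b) <;> by_cases hyd : y ∈ done <;>
      simp [PySem.Dict.contains_modify, PySem.Dict.contains_insert, hc, y1, y2, y3, hyd, hu, hl]
    · by_cases y1 : y = ((a : Int), b)
      · subst y1
        simp [PySem.Dict.getD_modify, PySem.Dict.getD_insert_self, n1, n2,
          pvNbrIn, pvCands, hu, hl, hcd, hdown, hright, n4, n5]
        exact fun h => absurd h (by omega)
      by_cases y2 : y = ((a : Int), b - 1)
      · subst y2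
        rw [PySem.Dict.getD_modify, if_pos rfl, PySem.Dict.getD_modify, if_neg n1,
          PySem.Dict.getD_insert_of_ne _ _ _ n1, hg, if_pos hu,
          if_pos (by simp [hu] : ((a, b - 1) : Int × Int) ∈ done ++ [(a, b)]), hupEq]
      · rw [PySem.Dict.getD_modify, if_neg y2, PySem.Dict.getD_modify, if_neg y1,
          PySem.Dict.getD_insert_of_ne _ _ _ y1, hg]
        by_cases hyd : y ∈ done
        · have y3 : y ≠ ((a : Int) - 1, b) := fun h => hl (h ▸ hyd)
          rw [if_pos hyd, if_pos (by simp [hyd]), hgen y hyd y2 y3]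
        · rw [if_neg hyd, if_neg (by simp [hyd, y1])]
  · -- only the left neighbour is processed
    rw [if_neg (by rw [hcont0]; simp [hu] :
      ¬ ((d.insert ((a : Int), b) ([] : List (Int × Int))).contains (a, b - 1) = true))]
    rw [if_pos (by simp [PySem.Dict.contains_insert, hc, hl] :
      (d.insert ((a : Int), b) ([] : List (Int × Int))).contains (a - 1, b) = true)]
    refine ⟨fun y => ?_, fun y => ?_⟩
    · by_cases y1 : y = ((a : Int), b) <;> by_cases y2 : y = ((a : Int), b - 1) <;>
      by_cases y3 : y = ((a : Int) - 1, b) <;> by_cases hyd : y ∈ done <;>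
      simp [PySem.Dict.contains_modify, PySem.Dict.contains_insert, hc, y1, y2, y3, hyd, hu, hl]
    · by_cases y1 : y = ((a : Int), b)
      · subst y1
        simp [PySem.Dict.getD_modify, PySem.Dict.getD_insert_self, n1, n2,
          pvNbrIn, pvCands, hu, hl, hcd, hdown, hright, n4, n5]
        exact fun h => absurd h (by omega)
      by_cases y3 : y = ((a : Int) - 1, b)
      · subst y3
        rw [PySem.Dict.getD_modify, if_pos rfl, PySem.Dict.getD_modify, if_neg n2,
          PySem.Dict.getD_insert_of_ne _ _ _ n2, hg, if_pos hl,
          if_pos (by simp [hl] : ((a - 1, b) : Int × Int) ∈ done ++ [(a, b)]), hlfEq]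
      · rw [PySem.Dict.getD_modify, if_neg y3, PySem.Dict.getD_modify, if_neg y1,
          PySem.Dict.getD_insert_of_ne _ _ _ y1, hg]
        by_cases hyd : y ∈ done
        · have y2 : y ≠ ((a : Int), b - 1) := fun h => hu (h ▸ hyd)
          rw [if_pos hyd, if_pos (by simp [hyd]), hgen y hyd y2 y3]
        · rw [if_neg hyd, if_neg (by simp [hyd, y1])]
  · -- no processed neighbour: the cell is only registered with an empty list
    rw [if_neg (by rw [hcont0]; simp [hu] :
      ¬ ((d.insert ((a : Int), b) ([] : List (Int × Int))).contains (a, b - 1) = true))]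
    rw [if_neg (by simp [PySem.Dict.contains_insert, hc, hl] :
      ¬ ((d.insert ((a : Int), b) ([] : List (Int × Int))).contains (a - 1, b) = true))]
    refine ⟨fun y => ?_, fun y => ?_⟩
    · by_cases y1 : y = ((a : Int), b) <;> by_cases y2 : y = ((a : Int), b - 1) <;>
      by_cases y3 : y = ((a : Int) - 1, b) <;> by_cases hyd : y ∈ done <;>
      simp [PySem.Dict.contains_insert, hc, y1, y2, y3, hyd, hu, hl]
    · by_cases y1 : y = ((a : Int), b)
      · subst y1
        simp [PySem.Dict.getD_insert_self,
          pvNbrIn, pvCands, hu, hl, hcd, hdown, hright, n4, n5]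
      · rw [PySem.Dict.getD_insert_of_ne _ _ _ y1, hg]
        by_cases hyd : y ∈ done
        · have y2 : y ≠ ((a : Int), b - 1) := fun h => hu (h ▸ hyd)
          have y3 : y ≠ ((a : Int) - 1, b) := fun h => hl (h ▸ hyd)
          rw [if_pos hyd, if_pos (by simp [hyd]), hgen y hyd y2 y3]
        · rw [if_neg hyd, if_neg (by simp [hyd, y1])]

theorem pv_loop (graph : List (List Int)) :
    ∀ (rest done : List (Int × Int)) (d : PySem.Dict (Int × Int) (List (Int × Int))),
      pvCm graph = done ++ rest →
      (∀ y, d.contains y = decide (y ∈ done)) →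
      (∀ y, d.getD y [] = if y ∈ done then pvNbrIn done y else []) →
      ∀ y, (rest.foldl pvStep d).getD y []
        = if y ∈ pvCm graph then pvNbrIn (pvCm graph) y else [] := by
  intro rest
  induction rest with
  | nil =>
    intro done d hcm _ hg y
    rw [List.append_nil] at hcm
    rw [hcm]; exact hg y
  | cons c rest ih =>
    intro done d hcm hc hg y
    have hpw := pv_cm_pairwise graph
    rw [hcm] at hpw
    have hdone : ∀ a ∈ done, pvLt a c := by
      intro a ha
      exact ((List.pairwise_append.mp hpw).2.2) a ha c List.mem_cons_self
    obtain ⟨hc', hg'⟩ := pv_step_spec c done hdone d hc hg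
    simp only [List.foldl_cons]
    exact ih (done ++ [c]) (pvStep d c) (by rw [hcm, List.append_assoc]; rfl) hc' hg' y

-- B's sweep computes, for every key, its open neighbours in candidate order
theorem pv_adj_getD (graph : List (List Int)) (y : Int × Int) :
    ((pvCm graph).foldl pvStep PySem.Dict.empty).getD y []
      = if y ∈ pvCm graph then pvNbrIn (pvCm graph) y else [] := by
  refine pv_loop graph (pvCm graph) [] PySem.Dict.empty rfl (fun y => ?_) (fun y => ?_) y
  · simp [PySem.Dict.contains_empty]
  · rw [if_neg (by simp)]
    exact PySem.Dict.getD_of_not_contains _ _ (PySem.Dict.contains_empty y)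

-- the common row-major output builder, as a function of the per-cell value
theorem pv_build_eq (graph : List (List Int)) (v : Int → Int → List (Int × Int)) :
    (((PySem.List.pyRange 0 (graph.length : Int) 1).foldl (fun d i =>
      (PySem.List.pyRange 0 (pvW graph) 1).foldl (fun d j =>
        if pvVal graph i j = 0 then
          d.insert (j, i) (v i j)
        else d) d) (PySem.Dict.empty : PySem.Dict (Int × Int) (List (Int × Int)))).items).map
        (fun p => (p.1.1, p.1.2, p.2))
      = (pvCells graph).map (fun c => (c.2, c.1, v c.1 c.2)) := by
  have hfilter : ∀ (i : Int) (d : PySem.Dict (Int × Int) (List (Int × Int))),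
      List.foldl (fun d j => if pvVal graph i j = 0 then d.insert (j, i) (v i j) else d)
        d (PySem.List.pyRange 0 (pvW graph) 1)
      = List.foldl (fun d c => d.insert (c.2, c.1) (v c.1 c.2)) d
          (List.map (fun j => ((i, j) : Int × Int))
            (List.filter (fun j => pvVal graph i j == 0) (PySem.List.pyRange 0 (pvW graph) 1))) := by
    intro i d
    rw [List.foldl_map]
    have h1 := pv_foldl_if_filter (fun j => pvVal graph i j = 0)
      (fun d j => d.insert (j, i) (v i j))
      (PySem.List.pyRange 0 (pvW graph) 1) d
    rw [List.filter_congr (fun j _ => (beq_eq_decide _ _).symm :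
      ∀ j ∈ PySem.List.pyRange 0 (pvW graph) 1,
        (decide (pvVal graph i j = 0)) = (pvVal graph i j == 0))] at h1
    exact h1
  simp only [hfilter]
  have h2 : List.foldl
      (fun d i =>
        List.foldl (fun d c => d.insert (c.2, c.1) (v c.1 c.2)) d
          (List.map (fun j => ((i, j) : Int × Int))
            (List.filter (fun j => pvVal graph i j == 0) (PySem.List.pyRange 0 (pvW graph) 1))))
      PySem.Dict.empty (PySem.List.pyRange 0 (graph.length : Int) 1)
      = List.foldl (fun d c => d.insert (c.2, c.1) (v c.1 c.2)) PySem.Dict.empty (pvCells graph) :=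
    pv_foldl_foldl_flatMap _ _ _ _
  rw [h2]
  have hemp : (PySem.Dict.empty : PySem.Dict (Int × Int) (List (Int × Int))).items = [] := rfl
  have h3 : (List.foldl (fun d c => d.insert (c.2, c.1) (v c.1 c.2))
        PySem.Dict.empty (pvCells graph)).items
      = List.map (fun c => (((c.2, c.1) : Int × Int), v c.1 c.2)) (pvCells graph) := by
    have hnodup : (List.map (fun c => ((c.2, c.1) : Int × Int)) (pvCells graph)).Nodup := by
      have := pv_nodup_flatMap_tag
        (fun i => (PySem.List.pyRange 0 (pvW graph) 1).filter (fun j => pvVal graph i j == 0))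
        (PySem.List.pyRange 0 (graph.length : Int) 1)
        (PySem.List.nodup_pyRange_one 0 (graph.length : Int))
        (fun i => (PySem.List.nodup_pyRange_one 0 (pvW graph)).filter _)
      simpa [pvCells, List.map_flatMap, List.map_map, Function.comp_def] using this
    have h := PySem.Dict.items_foldl_insert_fresh (pvCells graph)
      (fun c => ((c.2, c.1) : Int × Int)) (fun c => v c.1 c.2) PySem.Dict.empty
      (fun a _ => PySem.Dict.contains_empty _) hnodup
    simpa [hemp] using h
  rw [h3]
  simp [List.map_map, Function.comp_def]

theorem pv_A_eq (graph : List (List Int)) :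
    convert_graph graph = (pvCells graph).map (fun c => (c.2, c.1, pvNbrA graph c.1 c.2)) := by
  unfold convert_graph
  have hbody : ∀ i : Int,
      (fun (d : PySem.Dict (Int × Int) (List (Int × Int))) (j : Int) =>
        if PySem.List.pyGetD (PySem.List.pyGetD graph i []) j 1 = 0 then
          let current : Int × Int := (j, i)
          let neighbours : List (Int × Int) := []
          let neighbours := if i ≠ 0 ∧ PySem.List.pyGetD (PySem.List.pyGetD graph (i-1) []) j 1 = 0 then neighbours ++ [(j, i-1)] else neighbours
          let neighbours := if j ≠ 0 ∧ PySem.List.pyGetD (PySem.List.pyGetD graph i []) (j-1) 1 = 0 then neighbours ++ [(j-1, i)] else neighbours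
          let neighbours := if i ≠ (graph.length : Int) - 1 ∧ PySem.List.pyGetD (PySem.List.pyGetD graph (i+1) []) j 1 = 0 then neighbours ++ [(j, i+1)] else neighbours
          let neighbours := if j ≠ ((PySem.List.pyGetD graph 0 []).length : Int) - 1 ∧ PySem.List.pyGetD (PySem.List.pyGetD graph i []) (j+1) 1 = 0 then neighbours ++ [(j+1, i)] else neighbours
          d.insert current neighbours
        else d)
      = (fun d j => if pvVal graph i j = 0 then d.insert (j, i) (pvNbrA graph i j) else d) := by
    intro i
    funext d j
    by_cases h0 : pvVal graph i j = 0
    · simp only [pvVal] at h0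
      rw [if_pos h0, if_pos (by simpa [pvVal] using h0)]
      by_cases h1 : i ≠ 0 ∧ PySem.List.pyGetD (PySem.List.pyGetD graph (i-1) []) j 1 = 0 <;>
      by_cases h2 : j ≠ 0 ∧ PySem.List.pyGetD (PySem.List.pyGetD graph i []) (j-1) 1 = 0 <;>
      by_cases h3 : i ≠ (graph.length : Int) - 1 ∧ PySem.List.pyGetD (PySem.List.pyGetD graph (i+1) []) j 1 = 0 <;>
      by_cases h4 : j ≠ ((PySem.List.pyGetD graph 0 []).length : Int) - 1 ∧ PySem.List.pyGetD (PySem.List.pyGetD graph i []) (j+1) 1 = 0 <;>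
      simp [pvNbrA, pvVal, pvW, h1, h2, h3, h4]
    · rw [if_neg (by simpa [pvVal] using h0), if_neg h0]
  simp only [hbody]
  exact pv_build_eq graph (pvNbrA graph)

theorem pv_B_eq (graph : List (List Int)) :
    convert_graph_alt graph = (pvCells graph).map (fun c =>
      (c.2, c.1, ((pvCm graph).foldl pvStep PySem.Dict.empty).getD (c.2, c.1) [])) := by
  have hadj :
      ((PySem.List.pyRange 0 (pvW graph) 1).foldl (fun adj j =>
        (PySem.List.pyRange 0 (graph.length : Int) 1).foldl (fun adj i =>
          if pvVal graph i j = 0 then pvStep adj (j, i) else adj) adj)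
        (PySem.Dict.empty : PySem.Dict (Int × Int) (List (Int × Int))))
      = (pvCm graph).foldl pvStep PySem.Dict.empty := by
    have hfilter : ∀ (j : Int) (d : PySem.Dict (Int × Int) (List (Int × Int))),
        List.foldl (fun d i => if pvVal graph i j = 0 then pvStep d (j, i) else d) d
          (PySem.List.pyRange 0 (graph.length : Int) 1)
        = List.foldl pvStep d
            ((List.filter (fun i => pvVal graph i j == 0)
              (PySem.List.pyRange 0 (graph.length : Int) 1)).map (fun i => ((j, i) : Int × Int))) := by
      intro j d
      rw [List.foldl_map]
      have h1 := pv_foldl_if_filter (fun i => pvVal graph i j = 0)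
        (fun d i => pvStep d (j, i)) (PySem.List.pyRange 0 (graph.length : Int) 1) d
      rw [List.filter_congr (fun i _ => (beq_eq_decide _ _).symm :
        ∀ i ∈ PySem.List.pyRange 0 (graph.length : Int) 1,
          (decide (pvVal graph i j = 0)) = (pvVal graph i j == 0))] at h1
      exact h1
    simp only [hfilter]
    exact pv_foldl_foldl_flatMap
      (fun j => (List.filter (fun i => pvVal graph i j == 0)
        (PySem.List.pyRange 0 (graph.length : Int) 1)).map (fun i => ((j, i) : Int × Int)))
      pvStep _ _
  show (((PySem.List.pyRange 0 (graph.length : Int) 1).foldl (fun d i =>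
      (PySem.List.pyRange 0 (pvW graph) 1).foldl (fun d j =>
        if pvVal graph i j = 0 then
          d.insert (j, i)
            (((PySem.List.pyRange 0 (pvW graph) 1).foldl (fun adj j =>
              (PySem.List.pyRange 0 (graph.length : Int) 1).foldl (fun adj i =>
                if pvVal graph i j = 0 then pvStep adj (j, i) else adj) adj)
              (PySem.Dict.empty : PySem.Dict (Int × Int) (List (Int × Int)))).getD (j, i) [])
        else d) d) (PySem.Dict.empty : PySem.Dict (Int × Int) (List (Int × Int)))).items).map
        (fun p => (p.1.1, p.1.2, p.2))
      = (pvCells graph).map (fun c =>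
        (c.2, c.1, ((pvCm graph).foldl pvStep PySem.Dict.empty).getD (c.2, c.1) []))
  rw [hadj]
  exact pv_build_eq graph
    (fun i j => ((pvCm graph).foldl pvStep PySem.Dict.empty).getD (j, i) [])

theorem pv_nbr_eq (graph : List (List Int)) (i j : Int) (h : (i, j) ∈ pvCells graph) :
    pvNbrA graph i j = pvNbrIn (pvCm graph) (j, i) := by
  obtain ⟨h1, h2, h3, h4, _⟩ := pv_mem_cells.mp h
  have e1 : ((j, i-1) ∈ pvCm graph) ↔ (i ≠ 0 ∧ pvVal graph (i-1) j = 0) := by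
    rw [pv_mem_cm]
    constructor
    · rintro ⟨_, _, a, _, v⟩; exact ⟨by omega, v⟩
    · rintro ⟨a, v⟩; exact ⟨h3, h4, by omega, by omega, v⟩
  have e2 : ((j-1, i) ∈ pvCm graph) ↔ (j ≠ 0 ∧ pvVal graph i (j-1) = 0) := by
    rw [pv_mem_cm]
    constructor
    · rintro ⟨a, _, _, _, v⟩; exact ⟨by omega, v⟩
    · rintro ⟨a, v⟩; exact ⟨by omega, by omega, h1, h2, v⟩
  have e3 : ((j, i+1) ∈ pvCm graph) ↔ (i ≠ (graph.length : Int) - 1 ∧ pvVal graph (i+1) j = 0) := by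
    rw [pv_mem_cm]
    constructor
    · rintro ⟨_, _, _, a, v⟩; exact ⟨by omega, v⟩
    · rintro ⟨a, v⟩; exact ⟨h3, h4, by omega, by omega, v⟩
  have e4 : ((j+1, i) ∈ pvCm graph) ↔ (j ≠ pvW graph - 1 ∧ pvVal graph i (j+1) = 0) := by
    rw [pv_mem_cm]
    constructor
    · rintro ⟨_, a, _, _, v⟩; exact ⟨by omega, v⟩
    · rintro ⟨a, v⟩; exact ⟨by omega, by omega, h1, h2, v⟩
  simp only [pvNbrIn, pvCands, List.filter_cons, List.filter_nil, decide_eq_true_eq]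
  simp only [e1, e2, e3, e4, pvNbrA]
  by_cases c1 : i ≠ 0 ∧ pvVal graph (i-1) j = 0 <;>
  by_cases c2 : j ≠ 0 ∧ pvVal graph i (j-1) = 0 <;>
  by_cases c3 : i ≠ (graph.length : Int) - 1 ∧ pvVal graph (i+1) j = 0 <;>
  by_cases c4 : j ≠ pvW graph - 1 ∧ pvVal graph i (j+1) = 0 <;>
  simp [c1, c2, c3, c4]

-- ===== VERDICT (by name: the statement is the Claim_ definition above) =====
theorem convert_graph_spec : Claim_equal_convert_graph := by
  intro graph _ _
  unfold Spec_convert_graph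
  rw [pv_A_eq, pv_B_eq]
  apply List.map_congr_left
  rintro ⟨i, j⟩ hc
  have hm : (j, i) ∈ pvCm graph := by
    have := pv_mem_cells.mp hc
    exact pv_mem_cm.mpr ⟨this.2.2.1, this.2.2.2.1, this.1, this.2.1, this.2.2.2.2⟩
  show (j, i, pvNbrA graph i j)
      = (j, i, ((pvCm graph).foldl pvStep PySem.Dict.empty).getD (j, i) [])
  rw [pv_nbr_eq graph i j hc, pv_adj_getD, if_pos hm]
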